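-- pv_equiv track=rewrite | github.com/joshwill300/Machine_Learning | perceptron_classifier.py | kernel_p2
-- ===== SOURCE A (Python) =====
-- def count_substrings(s, p):
--     counts = {}
--     for i in range(len(s) - p + 1):
--         substring = s[i:i + p]
--         if substring not in counts:
--             counts[substring] = 1
--         else:
--             counts[substring] += 1
--     return counts
--
-- def kernel_p2(s, t, p):
--     count = 0
--     s_counts = count_substrings(s, p)
--     t_counts = count_substrings(t, p)
--
--     for key in s_counts:
--         if key in t_counts:
--             count += 1
--
--     return count
-- ===== SOURCE B (Python) =====
-- def _merge_count(a, b):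
--     # count elements common to two strictly increasing sorted lists by a two-pointer merge
--     i = j = count = 0
--     while i < len(a) and j < len(b):
--         if a[i] < b[j]:
--             i += 1
--         elif b[j] < a[i]:
--             j += 1
--         else:
--             count += 1
--             i += 1
--             j += 1
--     return count
--
-- def _sorted_unique_windows(x, p):
--     # distinct length-p windows (dict.fromkeys dedups, keeping first occurrence), sorted
--     return sorted(dict.fromkeys(x[i:i + p] for i in range(len(x) - p + 1)))
--
-- def kernel_p2(s, t, p):
--     return _merge_count(_sorted_unique_windows(s, p), _sorted_unique_windows(t, p))
-- ===== Notes on version B (the rewrite author's own statement) =====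
-- stated objective: alternative
-- what changed: B replaces A's hash-dict substring counting and key-membership loop by a sort-based algorithm: sort each string's length-p windows, drop adjacent duplicates, and count common elements with a two-pointer merge of the two sorted lists.
import Mathlib
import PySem

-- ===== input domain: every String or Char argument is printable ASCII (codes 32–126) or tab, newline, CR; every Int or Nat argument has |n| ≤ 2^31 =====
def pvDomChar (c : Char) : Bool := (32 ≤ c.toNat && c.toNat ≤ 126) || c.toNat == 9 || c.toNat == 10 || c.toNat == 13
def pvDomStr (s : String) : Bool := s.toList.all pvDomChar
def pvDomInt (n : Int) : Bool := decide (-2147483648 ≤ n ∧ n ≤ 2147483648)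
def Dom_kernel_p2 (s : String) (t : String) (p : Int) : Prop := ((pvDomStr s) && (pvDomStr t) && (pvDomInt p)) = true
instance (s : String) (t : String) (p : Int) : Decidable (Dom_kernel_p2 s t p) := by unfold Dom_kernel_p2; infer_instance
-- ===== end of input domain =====

-- B replaces A's hash-dict counting and key-membership loop by a sort-based algorithm:
-- sort the windows, drop adjacent duplicates, and count common elements by a two-pointer
-- merge of the two sorted lists (objective: alternative; same result, no hashing).

-- ===== PORT A =====
-- count_substrings: dict of substring -> occurrence count, built left to right
def pvCountSubstrings (s : String) (p : Int) : PySem.Dict String Int :=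
  (PySem.List.pyRange 0 (PySem.Str.len s - p + 1) 1).foldl
    (fun counts i =>
      let substring := PySem.Str.slice s (some i) (some (i + p))
      if counts.contains substring = false then counts.insert substring 1
      else counts.modify substring 0 (· + 1))
    PySem.Dict.empty

def kernel_p2 (s : String) (t : String) (p : Int) : Int :=
  let count : Int := 0
  let s_counts := pvCountSubstrings s p
  let t_counts := pvCountSubstrings t p
  s_counts.keys.foldl (fun count key => if t_counts.contains key then count + 1 else count) count

-- ===== PORT B =====
-- two-pointer merge count over two sorted lists; the Python while-loop over indices i, j
-- becomes the same loop as a recursion over the two list suffixes a[i:], b[j:]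
def pvMergeCount : List String → List String → Int
  | [], _ => 0
  | _ :: _, [] => 0
  | x :: a, y :: b =>
      if x < y then pvMergeCount a (y :: b)
      else if y < x then pvMergeCount (x :: a) b
      else 1 + pvMergeCount a b
termination_by a b => a.length + b.length

-- distinct windows (dict.fromkeys = PySem.List.dedup), then sorted
def pvSortedUniqueWindows (x : String) (p : Int) : List String :=
  PySem.List.sorted
    (PySem.List.dedup
      ((PySem.List.pyRange 0 (PySem.Str.len x - p + 1) 1).map
        (fun i => PySem.Str.slice x (some i) (some (i + p)))))
    (fun w => w) false

def kernel_p2_alt (s : String) (t : String) (p : Int) : Int :=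
  pvMergeCount (pvSortedUniqueWindows s p) (pvSortedUniqueWindows t p)

-- ===== PRECONDITION & SPEC =====
def Spec_kernel_p2 (s : String) (t : String) (p : Int) (out : Int) : Prop := out = kernel_p2_alt s t p
instance (s : String) (t : String) (p : Int) (out : Int) : Decidable (Spec_kernel_p2 s t p out) := by unfold Spec_kernel_p2; infer_instance

-- ===== CLAIM (what is proved, stated in full; the proofs are below) =====
def Claim_equal_kernel_p2 : Prop := ∀ (s : String) (t : String) (p : Int), Dom_kernel_p2 s t p → Spec_kernel_p2 s t p (kernel_p2 s t p)

-- ===== LEMMAS AND PROOFS =====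

-- the window list both programs slice out
def pvWindows (x : String) (p : Int) : List String :=
  (PySem.List.pyRange 0 (PySem.Str.len x - p + 1) 1).map
    (fun i => PySem.Str.slice x (some i) (some (i + p)))

-- A's counting loop, re-expressed as a fold over the window list
def pvStep (d : PySem.Dict String Int) (x : String) : PySem.Dict String Int :=
  if d.contains x = false then d.insert x 1 else d.modify x 0 (· + 1)

lemma countSubstrings_eq_fold (s : String) (p : Int) :
    pvCountSubstrings s p = (pvWindows s p).foldl pvStep PySem.Dict.empty := by
  unfold pvCountSubstrings pvWindows pvStep
  rw [List.foldl_map]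

lemma keys_step_fold (l : List String) (d : PySem.Dict String Int) :
    (l.foldl pvStep d).keys = PySem.Set.update d.keys l := by
  induction l generalizing d with
  | nil => simp [PySem.Set.update]
  | cons x l ih =>
    rw [List.foldl_cons, ih, PySem.Set.update_cons]
    congr 1
    unfold pvStep
    by_cases h : d.contains x = true
    · rw [PySem.Set.add_of_mem ((PySem.Dict.contains_iff_mem_keys d x).mp h)]
      simp [h]
      exact PySem.Dict.keys_insert_of_contains d (d.getD x 0 + 1) h
    · have hx : d.contains x = false := by simpa using h
      rw [PySem.Set.add_of_not_mem (fun hm =>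
          h ((PySem.Dict.contains_iff_mem_keys d x).mpr hm))]
      simp [hx]
      exact PySem.Dict.keys_insert_of_not_contains d 1 hx

lemma keys_countSubstrings (s : String) (p : Int) :
    (pvCountSubstrings s p).keys = PySem.Set.ofList (pvWindows s p) := by
  rw [countSubstrings_eq_fold, keys_step_fold]
  simp [PySem.Set.update_nil_left]

lemma foldl_count_filter {α : Type} (P : α → Bool) (l : List α) (c : Int) :
    l.foldl (fun c k => if P k then c + 1 else c) c = c + ((l.filter P).length : Int) := by
  induction l generalizing c with
  | nil => simp
  | cons x l ih =>
    by_cases h : P x = true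
    · simp [h, ih]; ring
    · have hx : P x = false := by simpa using h
      simp [hx, ih]

lemma sortedUniqueWindows_spec (x : String) (p : Int) :
    (pvSortedUniqueWindows x p).Pairwise (· < ·) ∧
    (∀ w, w ∈ pvSortedUniqueWindows x p ↔ w ∈ pvWindows x p) := by
  unfold pvSortedUniqueWindows
  rw [show (PySem.List.dedup
      ((PySem.List.pyRange 0 (PySem.Str.len x - p + 1) 1).map
        (fun i => PySem.Str.slice x (some i) (some (i + p))))) = PySem.List.dedup (pvWindows x p) from rfl]
  rw [PySem.List.dedup_eq_ofList]
  refine ⟨PySem.List.sorted_ofList_pairwise_lt _, fun w => ?_⟩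
  rw [PySem.List.mem_sorted, PySem.Set.mem_ofList]

-- the merge count of two strictly sorted lists counts the elements of a lying in b
lemma mergeCount_eq_filter : ∀ (n : Nat) (a b : List String),
    a.length + b.length ≤ n → a.Pairwise (· < ·) → b.Pairwise (· < ·) →
    pvMergeCount a b = ((a.filter (fun z => decide (z ∈ b))).length : Int) := by
  intro n
  induction n with
  | zero =>
    intro a b hlen _ _
    have : a = [] := by cases a <;> simp_all
    subst this; simp [pvMergeCount]
  | succ n ih =>
    intro a b hlen ha hb
    match a, b with
    | [], _ => simp [pvMergeCount]
    | _ :: _, [] => simp [pvMergeCount]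
    | x :: a', y :: b' =>
      have ha' := (List.pairwise_cons.mp ha).2
      have hb' := (List.pairwise_cons.mp hb).2
      have hay := (List.pairwise_cons.mp ha).1
      have hby := (List.pairwise_cons.mp hb).1
      by_cases hxy : x < y
      · have hnot : x ∉ y :: b' := by
          intro hmem
          rcases List.mem_cons.mp hmem with rfl | hx'
          · exact lt_irrefl x hxy
          · exact lt_irrefl x (lt_trans hxy (hby x hx'))
        rw [show pvMergeCount (x :: a') (y :: b') = pvMergeCount a' (y :: b') by
          simp [pvMergeCount, hxy]]
        rw [ih a' (y :: b') (by simp at hlen ⊢; omega) ha' hb]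
        have hfe : (x :: a').filter (fun z => decide (z ∈ y :: b')) =
            a'.filter (fun z => decide (z ∈ y :: b')) := by
          rw [List.filter_cons]; simp [hnot]
        rw [hfe]
      · by_cases hyx : y < x
        · rw [show pvMergeCount (x :: a') (y :: b') = pvMergeCount (x :: a') b' by
            simp [pvMergeCount, hxy, hyx]]
          rw [ih (x :: a') b' (by simp at hlen ⊢; omega) ha hb']
          congr 2
          apply List.filter_congr
          intro z hz
          have hyz : y < z := by
            rcases List.mem_cons.mp hz with rfl | hz'
            · exact hyx
            · exact lt_trans hyx (hay z hz')
          have hzy : z ≠ y := ne_of_gt hyz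
          simp [List.mem_cons, hzy]
        · have hxeq : x = y := le_antisymm (le_of_not_gt hyx) (le_of_not_gt hxy)
          rw [show pvMergeCount (x :: a') (y :: b') = 1 + pvMergeCount a' b' by
            simp [pvMergeCount, hxy, hyx]]
          rw [ih a' b' (by simp at hlen ⊢; omega) ha' hb']
          have hfe : (x :: a').filter (fun z => decide (z ∈ y :: b')) =
              x :: a'.filter (fun z => decide (z ∈ b')) := by
            rw [List.filter_cons]
            rw [if_pos (by simp [hxeq])]
            congr 1
            apply List.filter_congr
            intro z hz
            have hxz : x < z := hay z hz
            have hzy : z ≠ y := by rw [← hxeq]; exact ne_of_gt hxz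
            simp [List.mem_cons, hzy]
          rw [hfe]
          simp; ring

theorem kernel_p2_eq_alt (s : String) (t : String) (p : Int) :
    kernel_p2 s t p = kernel_p2_alt s t p := by
  unfold kernel_p2 kernel_p2_alt
  rw [foldl_count_filter, keys_countSubstrings]
  obtain ⟨hsa, hma⟩ := sortedUniqueWindows_spec s p
  obtain ⟨hsb, hmb⟩ := sortedUniqueWindows_spec t p
  rw [mergeCount_eq_filter ((pvSortedUniqueWindows s p).length + (pvSortedUniqueWindows t p).length)
    _ _ (le_refl _) hsa hsb]
  -- both sides: |{distinct s-windows lying among t-windows}|, via a permutation of nodup lists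
  have hperm : (PySem.Set.ofList (pvWindows s p)).Perm (pvSortedUniqueWindows s p) := by
    apply (List.perm_ext_iff_of_nodup (PySem.Set.nodup_ofList _) (List.Pairwise.imp (fun h => ne_of_lt h) hsa)).mpr
    intro w
    rw [PySem.Set.mem_ofList, hma w]
  have hpred : ∀ w, ((pvCountSubstrings t p).contains w) = decide (w ∈ pvSortedUniqueWindows t p) := by
    intro w
    rw [PySem.Dict.contains_eq_decide_mem_keys, keys_countSubstrings]
    simp only [decide_eq_decide]
    rw [PySem.Set.mem_ofList, hmb w]
  have : (PySem.Set.ofList (pvWindows s p)).filter (fun w => (pvCountSubstrings t p).contains w) =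
      (PySem.Set.ofList (pvWindows s p)).filter (fun w => decide (w ∈ pvSortedUniqueWindows t p)) := by
    apply List.filter_congr; intro w _; exact hpred w
  rw [this]
  have := (hperm.filter (fun w => decide (w ∈ pvSortedUniqueWindows t p))).length_eq
  simp [this]

-- ===== VERDICT (by name: the statement is the Claim_ definition above) =====
theorem kernel_p2_spec : Claim_equal_kernel_p2 := by
  intro s t p _
  unfold Spec_kernel_p2
  exact kernel_p2_eq_alt s t p
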